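-- pv_equiv track=rewrite | github.com/jensen-Shen-Li/Modern-Digital-Signal | train.py | statis_comp
-- ===== SOURCE A (Python) =====
-- def statis_comp(x):
--     mar_len = []
--     flag = 0
--     for i in range(len(x) - 1):
--         if abs(x[i + 1] - x[i]) >= 10:
--             len_comp = abs(flag - (i + 1))
--             flag = i + 1
--             # if len_comp > 0:
--             mar_len.append(len_comp)
--             continue
--     return mar_len
-- ===== SOURCE B (Python) =====
-- def statis_comp(x):
--     jumps = [i + 1 for i in range(len(x) - 1) if abs(x[i + 1] - x[i]) >= 10]
--     return [b - a for a, b in zip([0] + jumps, jumps)]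
-- ===== Notes on version B (the rewrite author's own statement) =====
-- stated objective: alternative
-- what changed: Replaces the interleaved accumulator loop (running flag, append on each jump) by two separate passes: first build the list of jump boundary positions, then emit consecutive differences of that list prefixed with zero via zip.
import Mathlib
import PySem

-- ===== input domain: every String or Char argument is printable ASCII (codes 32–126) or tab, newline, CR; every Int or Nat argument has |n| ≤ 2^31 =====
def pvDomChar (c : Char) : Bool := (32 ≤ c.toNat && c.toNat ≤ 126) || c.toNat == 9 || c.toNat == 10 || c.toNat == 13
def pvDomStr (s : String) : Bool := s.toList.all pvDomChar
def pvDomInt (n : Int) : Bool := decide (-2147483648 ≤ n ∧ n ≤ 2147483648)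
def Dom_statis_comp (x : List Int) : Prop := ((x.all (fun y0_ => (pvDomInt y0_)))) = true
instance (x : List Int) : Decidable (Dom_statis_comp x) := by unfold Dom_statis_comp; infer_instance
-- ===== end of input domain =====

-- ===== PORT A =====
-- B builds the jump-boundary positions first and then takes consecutive differences,
-- instead of A's single loop with a running flag accumulator (return value only).
def statis_comp (x : List Int) : List Int :=
  ((PySem.List.pyRange 0 ((x.length : Int) - 1) 1).foldl
    (fun (s : List Int × Int) i =>
      if 10 ≤ |PySem.List.pyGetD x (i + 1) 0 - PySem.List.pyGetD x i 0| then
        (s.1 ++ [|s.2 - (i + 1)|], i + 1)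
      else s)
    ([], 0)).1

-- ===== PORT B =====
def statis_comp_alt (x : List Int) : List Int :=
  let jumps := ((PySem.List.pyRange 0 ((x.length : Int) - 1) 1).filter
      (fun i => decide (10 ≤ |PySem.List.pyGetD x (i + 1) 0 - PySem.List.pyGetD x i 0|))).map
      (fun i => i + 1)
  ((0 :: jumps).zip jumps).map (fun p => p.2 - p.1)

-- ===== PRECONDITION & SPEC =====
def Spec_statis_comp (x : List Int) (out : List Int) : Prop := out = statis_comp_alt x
instance (x : List Int) (out : List Int) : Decidable (Spec_statis_comp x out) := by unfold Spec_statis_comp; infer_instance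

-- ===== CLAIM (what is proved, stated in full; the proofs are below) =====
def Claim_equal_statis_comp : Prop := ∀ (x : List Int), Dom_statis_comp x → Spec_statis_comp x (statis_comp x)

-- ===== LEMMAS AND PROOFS =====

-- consecutive differences of f :: js
def pvDiffs : Int → List Int → List Int
  | _, [] => []
  | f, j :: js => (j - f) :: pvDiffs j js

theorem pvZip_eq_diffs (js : List Int) (f : Int) :
    ((f :: js).zip js).map (fun p => p.2 - p.1) = pvDiffs f js := by
  induction js generalizing f with
  | nil => rfl
  | cons j js ih =>
    rw [List.zip_cons_cons, List.map_cons, ih j]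
    rfl

theorem pvFold_eq (x : List Int) (l : List Int)
    (acc : List Int) (flag : Int)
    (hs : l.Pairwise (· < ·)) (hf : ∀ j ∈ l, flag ≤ j) :
    (l.foldl
      (fun (s : List Int × Int) i =>
        if 10 ≤ |PySem.List.pyGetD x (i + 1) 0 - PySem.List.pyGetD x i 0| then
          (s.1 ++ [|s.2 - (i + 1)|], i + 1)
        else s)
      (acc, flag)).1
    = acc ++ pvDiffs flag ((l.filter
        (fun i => decide (10 ≤ |PySem.List.pyGetD x (i + 1) 0 - PySem.List.pyGetD x i 0|))).map
        (fun i => i + 1)) := by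
  induction l generalizing acc flag with
  | nil => simp [pvDiffs]
  | cons i l ih =>
    have hfi : flag ≤ i := hf i (by simp)
    have hs' := (List.pairwise_cons.mp hs).2
    have hlt := (List.pairwise_cons.mp hs).1
    by_cases hp : 10 ≤ |PySem.List.pyGetD x (i + 1) 0 - PySem.List.pyGetD x i 0|
    · have habs : |flag - (i + 1)| = (i + 1) - flag := by
        rw [abs_of_nonpos (by omega)]; ring
      rw [List.foldl_cons, if_pos hp,
        ih (acc ++ [|flag - (i + 1)|]) (i + 1) hs' (fun j hj => by have := hlt j hj; omega),
        List.filter_cons_of_pos (by simpa using hp), List.map_cons, pvDiffs, habs,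
        List.append_assoc, List.singleton_append]
    · rw [List.foldl_cons, if_neg hp, List.filter_cons_of_neg (by simpa using hp)]
      exact ih acc flag hs' (fun j hj => hf j (List.mem_cons_of_mem _ hj))

-- ===== VERDICT (by name: the statement is the Claim_ definition above) =====
theorem statis_comp_spec : Claim_equal_statis_comp := by
  intro x _
  unfold Spec_statis_comp statis_comp statis_comp_alt
  rw [pvZip_eq_diffs,
    pvFold_eq x _ [] 0 (PySem.List.pairwise_lt_pyRange_one 0 _)
      (fun j hj => ((PySem.List.mem_pyRange_one).mp hj).1),
    List.nil_append]
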